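-- pv_equiv track=rewrite | github.com/zhangyiyuan111/gitlearn | git_auto_test/auto_api_test/commons/replace_unit.py | get_times
-- ===== SOURCE A (Python) =====
-- def get_times(date):
--     cont_start = 0
--     cont_end = 0
--     time_appear =0
--     for i, j in enumerate(date):
--         if date[i:i + 2] == "${":
--             cont_start = cont_start + 1
--         if date[i] == "}":
--             cont_end = cont_end + 1
--         if cont_start > 0 and cont_start == cont_end:
--             time_appear = time_appear+1
--     return time_appear
-- ===== SOURCE B (Python) =====
-- def get_times(date):
--     n = len(date)
--     starts = []
--     t = 0
--     for i in range(n):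
--         t += date[i:i + 2] == "${"
--         starts.append(t)
--     ends = []
--     t = 0
--     for c in date:
--         t += c == "}"
--         ends.append(t)
--     return sum(1 for s, e in zip(starts, ends) if s > 0 and s == e)
-- ===== Notes on version B (the rewrite author's own statement) =====
-- stated objective: alternative
-- what changed: The single fused scan carrying three counters is replaced by building two prefix-count tables (cumulative '${' starts and cumulative '}' ends) in separate passes and then a zip pass counting positions where the start-count is positive and equals the end-count.
import Mathlib
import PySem

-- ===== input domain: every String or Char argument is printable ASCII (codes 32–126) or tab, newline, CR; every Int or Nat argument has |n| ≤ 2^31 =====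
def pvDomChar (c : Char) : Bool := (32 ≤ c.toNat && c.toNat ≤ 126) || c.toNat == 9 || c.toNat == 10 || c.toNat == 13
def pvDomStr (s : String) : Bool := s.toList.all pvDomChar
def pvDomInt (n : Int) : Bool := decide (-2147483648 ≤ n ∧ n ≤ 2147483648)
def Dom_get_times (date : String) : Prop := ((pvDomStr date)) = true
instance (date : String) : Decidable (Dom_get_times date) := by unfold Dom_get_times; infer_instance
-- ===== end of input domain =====

-- B replaces A's fused three-counter scan by two prefix-count tables plus a separate zip/count pass (alternative decomposition, same cost).

-- ===== PORT A =====
def get_times (date : String) : Int :=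
  let s := date.toList
  let r := (PySem.List.enumerate s 0).foldl
    (fun (st : Int × Int × Int) ij =>
      let cont_start := if PySem.List.slice s (some ij.1) (some (ij.1 + 2)) = ['$', '{'] then st.1 + 1 else st.1
      let cont_end := if PySem.List.pyGet? s ij.1 = some '}' then st.2.1 + 1 else st.2.1
      let time_appear := if 0 < cont_start ∧ cont_start = cont_end then st.2.2 + 1 else st.2.2
      (cont_start, cont_end, time_appear))
    (0, 0, 0)
  r.2.2

-- ===== PORT B =====
def get_times_alt (date : String) : Int :=
  let s := date.toList
  let starts := ((PySem.List.pyRange 0 (s.length : Int) 1).foldl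
    (fun (p : List Int × Int) i =>
      let t := p.2 + (if PySem.List.slice s (some i) (some (i + 2)) = ['$', '{'] then 1 else 0)
      (p.1 ++ [t], t)) ([], 0)).1
  let ends := (s.foldl
    (fun (p : List Int × Int) c =>
      let t := p.2 + (if c = '}' then 1 else 0)
      (p.1 ++ [t], t)) ([], 0)).1
  (starts.zip ends).foldl (fun n se => if 0 < se.1 ∧ se.1 = se.2 then n + 1 else n) 0

-- ===== PRECONDITION & SPEC =====
def Spec_get_times (date : String) (out : Int) : Prop := out = get_times_alt date
instance (date : String) (out : Int) : Decidable (Spec_get_times date out) := by unfold Spec_get_times; infer_instance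

-- ===== CLAIM (what is proved, stated in full; the proofs are below) =====
def Claim_equal_get_times : Prop := ∀ (date : String), Dom_get_times date → Spec_get_times date (get_times date)

-- ===== LEMMAS AND PROOFS =====

-- prefix-count list: running sums c + F x1, c + F x1 + F x2, …
def prefL {α : Type} (F : α → Int) : Int → List α → List Int
  | _, [] => []
  | c, x :: xs => (c + F x) :: prefL F (c + F x) xs

-- B's table-building loop produces prefL
theorem build_prefL {α : Type} (F : α → Int) (xs : List α) : ∀ (acc : List Int) (c : Int),
    (xs.foldl (fun (p : List Int × Int) x => (p.1 ++ [p.2 + F x], p.2 + F x)) (acc, c)).1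
      = acc ++ prefL F c xs := by
  induction xs with
  | nil => intro acc c; simp [prefL]
  | cons x xs ih =>
    intro acc c
    simp only [List.foldl_cons, prefL]
    rw [ih]
    simp

-- A's fused scan, abstracted over the two indicator functions, equals the zip/count of the two prefix lists
theorem fused {α : Type} (F G : α → Int) (xs : List α) : ∀ (cs ce t : Int),
    (xs.foldl (fun (st : Int × Int × Int) x =>
        let cs' := st.1 + F x
        let ce' := st.2.1 + G x
        (cs', ce', if 0 < cs' ∧ cs' = ce' then st.2.2 + 1 else st.2.2)) (cs, ce, t)).2.2
      = ((prefL F cs xs).zip (prefL G ce xs)).foldl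
          (fun n se => if 0 < se.1 ∧ se.1 = se.2 then n + 1 else n) t := by
  induction xs with
  | nil => intro cs ce t; simp [prefL]
  | cons x xs ih =>
    intro cs ce t
    simp only [List.foldl_cons, prefL, List.zip_cons_cons]
    exact ih (cs + F x) (ce + G x) _

-- pointwise-equal step functions give equal folds
theorem foldl_funext {α β : Type} (f g : β → α → β) (h : ∀ b a, f b a = g b a) (xs : List α) (init : β) :
    xs.foldl f init = xs.foldl g init := by
  have : f = g := funext fun b => funext fun a => h b a
  rw [this]

-- the '}' prefix counts over the characters coincide with the pyGet?-based counts over the index range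
theorem pref_chars (g : Char → Int) : ∀ (s pre : List Char) (ce : Int),
    prefL g ce s
      = prefL (fun i : Int => g (((pre ++ s).getD i.toNat ' ')))
          ce (PySem.List.pyRange pre.length (pre.length + s.length) 1) := by
  intro s
  induction s with
  | nil => intro pre ce; simp [prefL, PySem.List.pyRange]
  | cons c tl ih =>
    intro pre ce
    have hlt : (pre.length : Int) < pre.length + (c :: tl).length := by
      simp only [List.length_cons]; push_cast; omega
    rw [PySem.List.pyRange_one_cons hlt]
    simp only [prefL]
    have hhead : ((pre ++ c :: tl).getD (pre.length : Int).toNat ' ') = c := by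
      simp [List.getD]
    rw [hhead]
    have := ih (pre ++ [c]) (ce + g c)
    have harr : pre ++ c :: tl = (pre ++ [c]) ++ tl := by simp
    have hlen : ((pre ++ [c]).length : Int) = (pre.length : Int) + 1 := by simp
    have hend : (pre.length : Int) + ((c :: tl).length : Int)
        = ((pre ++ [c]).length : Int) + (tl.length : Int) := by simp; omega
    rw [harr, hend, ← hlen]
    exact congrArg _ this

-- prefL only looks at F on members of the list
theorem prefL_congr {α : Type} (F F' : α → Int) (xs : List α) (h : ∀ x ∈ xs, F x = F' x) :
    ∀ c, prefL F c xs = prefL F' c xs := by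
  induction xs with
  | nil => intro c; rfl
  | cons x xs ih =>
    intro c
    simp only [prefL, h x (by simp)]
    exact congrArg _ (ih (fun y hy => h y (by simp [hy])) _)

theorem pref_chars_range (date : String) :
    prefL (fun c => if c = '}' then (1:Int) else 0) 0 date.toList
      = prefL (fun i : Int => if PySem.List.pyGet? date.toList i = some '}' then (1:Int) else 0) 0
          (PySem.List.pyRange 0 (date.toList.length : Int) 1) := by
  have h := pref_chars (fun c => if c = '}' then (1:Int) else 0) date.toList []
  simp only [List.length_nil, Nat.cast_zero, List.nil_append, zero_add] at h
  rw [h 0]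
  apply prefL_congr
  intro i hi
  rw [PySem.List.mem_pyRange_one] at hi
  obtain ⟨h0, hlt⟩ := hi
  have hn : i.toNat < date.toList.length := by omega
  rw [show PySem.List.pyGet? date.toList i = date.toList[i.toNat]? from PySem.List.pyGet?_of_nonneg _ h0]
  simp [List.getD, List.getElem?_eq_getElem hn]

theorem get_times_eq_alt (date : String) : get_times date = get_times_alt date := by
  unfold get_times get_times_alt
  dsimp only
  rw [PySem.List.enumerate_eq_map_pyRange (d := ' '), List.foldl_map]
  rw [build_prefL, build_prefL]
  rw [foldl_funext _
      (fun (st : Int × Int × Int) (i : Int) =>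
        let cs' := st.1 + (if PySem.List.slice date.toList (some i) (some (i+2)) = ['$','{'] then 1 else 0)
        let ce' := st.2.1 + (if PySem.List.pyGet? date.toList i = some '}' then 1 else 0)
        (cs', ce', if 0 < cs' ∧ cs' = ce' then st.2.2 + 1 else st.2.2))
      (by intro st i; dsimp only; split_ifs <;> simp_all <;> omega)]
  rw [fused]
  simp only [List.nil_append]
  rw [pref_chars_range]
  rfl

-- ===== VERDICT (by name: the statement is the Claim_ definition above) =====
theorem get_times_spec : Claim_equal_get_times := by
  intro date _
  unfold Spec_get_times
  exact get_times_eq_alt date
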